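-- pv_equiv track=rewrite | github.com/yangtianyinying/GraphColoringProblem | doc/CSPLatex/analysis-1/code/analysis-1.py | fill_count
-- ===== SOURCE A (Python) =====
-- def fill_count(adjacency: list[set[int]], node: int) -> int:
--     neighbors = sorted(adjacency[node])
--     count = 0
--     for left_index, left in enumerate(neighbors):
--         for right in neighbors[left_index + 1 :]:
--             if right not in adjacency[left]:
--                 count += 1
--     return count
-- ===== SOURCE B (Python) =====
-- def fill_count(adjacency: list[set[int]], node: int) -> int:
--     neighbors = adjacency[node]
--     k = len(neighbors)
--     adjacent = 0
--     for left in neighbors: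
--         row = adjacency[left]
--         adjacent += sum(1 for r in row if r > left and r in neighbors)
--     return k * (k - 1) // 2 - adjacent
-- ===== Notes on version B (the rewrite author's own statement) =====
-- stated objective: alternative
-- what changed: B replaces A's test-every-sorted-pair-for-non-adjacency double loop by counting: all C(k,2) neighbor pairs minus the adjacent pairs, found by scanning each neighbor's own adjacency row for later neighbors.
-- outside the precondition, e.g. on fill_count([{0, 5}], 0): A returns 0, B raises IndexError
import Mathlib
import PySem

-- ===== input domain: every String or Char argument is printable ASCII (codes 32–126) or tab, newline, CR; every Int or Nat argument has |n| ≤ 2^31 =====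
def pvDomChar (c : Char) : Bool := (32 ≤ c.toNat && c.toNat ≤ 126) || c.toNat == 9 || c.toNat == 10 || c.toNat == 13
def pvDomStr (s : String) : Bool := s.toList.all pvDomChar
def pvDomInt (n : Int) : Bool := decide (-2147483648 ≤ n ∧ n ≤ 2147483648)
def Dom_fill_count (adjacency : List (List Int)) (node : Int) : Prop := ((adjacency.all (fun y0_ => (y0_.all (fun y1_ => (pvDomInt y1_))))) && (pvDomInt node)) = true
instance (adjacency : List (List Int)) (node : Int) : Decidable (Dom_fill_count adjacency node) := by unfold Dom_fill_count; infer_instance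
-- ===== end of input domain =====

-- B counts all C(k,2) neighbor pairs and subtracts the adjacent pairs found in the neighbors' own
-- rows, instead of A's test-every-sorted-pair-for-non-adjacency double loop (objective: alternative).

-- ===== PORT A =====
def fill_count (adjacency : List (List Int)) (node : Int) : Int :=
  match PySem.List.pyGet? adjacency node with
  | none => 0   -- IndexError (excluded by Pre_)
  | some ns =>
    let neighbors := PySem.List.sorted ns (fun x => x)
    (PySem.List.enumerate neighbors).foldl
      (fun count p =>
        (PySem.List.slice neighbors (some (p.1 + 1))).foldl
          (fun c right =>
            match PySem.List.pyGet? adjacency p.2 with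
            | none => c   -- IndexError (excluded by Pre_)
            | some row => if !(row.contains right) then c + 1 else c)
          count)
      0

-- ===== PORT B =====
def fill_count_alt (adjacency : List (List Int)) (node : Int) : Int :=
  match PySem.List.pyGet? adjacency node with
  | none => 0   -- IndexError (excluded by Pre_)
  | some neighbors =>
    let k : Int := neighbors.length
    let adjacent := neighbors.foldl
      (fun acc left =>
        match PySem.List.pyGet? adjacency left with
        | none => acc   -- IndexError (excluded by Pre_)
        | some row =>
          acc + row.foldl (fun c r => if decide (left < r) && neighbors.contains r then c + 1 else c) 0)
      0
    PySem.Int.floordiv (k * (k - 1)) 2 - adjacent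

-- ===== PRECONDITION & SPEC =====
-- Pre_ excludes: inputs where the node index or any neighbor used as a row index is out of range
-- (A raises IndexError there, except when ONLY the largest neighbor's row index is invalid —
-- then A returns without ever dereferencing it while B's natural scan of every row raises); and
-- rows with duplicate entries, which the Python set[int] representation cannot produce.
def Pre_fill_count (adjacency : List (List Int)) (node : Int) : Prop :=
  (PySem.List.pyGet? adjacency node).isSome = true ∧
  (∀ x ∈ (PySem.List.pyGet? adjacency node).getD [], (PySem.List.pyGet? adjacency x).isSome = true) ∧
  (∀ row ∈ adjacency, row.Nodup)
instance (adjacency : List (List Int)) (node : Int) : Decidable (Pre_fill_count adjacency node) := by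
  unfold Pre_fill_count; infer_instance

def pvWitness_fill_count : List (List Int) × Int := ([[1], [0]], 0)

def Spec_fill_count (adjacency : List (List Int)) (node : Int) (out : Int) : Prop := out = fill_count_alt adjacency node
instance (adjacency : List (List Int)) (node : Int) (out : Int) : Decidable (Spec_fill_count adjacency node out) := by unfold Spec_fill_count; infer_instance

-- ===== CLAIM (what is proved, stated in full; the proofs are below) =====
def Claim_equal_fill_count : Prop := ∀ (adjacency : List (List Int)) (node : Int), Dom_fill_count adjacency node → Pre_fill_count adjacency node → Spec_fill_count adjacency node (fill_count adjacency node)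

-- ===== LEMMAS AND PROOFS =====

-- A's loop as structural recursion over the sorted neighbor list (same inner loop body).
def aRec (adjacency : List (List Int)) : List Int → Int → Int
  | [], acc => acc
  | x :: t, acc =>
    aRec adjacency t
      (t.foldl
        (fun c right =>
          match PySem.List.pyGet? adjacency x with
          | none => c
          | some row => if !(row.contains right) then c + 1 else c)
        acc)

-- Σ over suffixes x :: t of |t| (the number of pairs A inspects).
def sufLen : List Int → Int
  | [] => 0
  | _ :: t => (t.length : Int) + sufLen t

-- Σ over suffixes x :: t of the number of later neighbors adjacent to x (A's "adjacent" pairs).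
def sufAdj (adjacency : List (List Int)) : List Int → Int
  | [] => 0
  | x :: t =>
    (match PySem.List.pyGet? adjacency x with
     | none => 0
     | some row => (List.countP (fun y => row.contains y) t : Int)) + sufAdj adjacency t

-- B's per-neighbor term.
def bCnt (adjacency : List (List Int)) (ns : List Int) (x : Int) : Int :=
  match PySem.List.pyGet? adjacency x with
  | none => 0
  | some row => (List.countP (fun r => decide (x < r) && ns.contains r) row : Int)

lemma foldA (adjacency : List (List Int)) (full : List Int) :
    ∀ (t : List Int) (j : Nat), full.drop j = t → ∀ acc : Int,
      (PySem.List.enumerate t (j : Int)).foldl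
        (fun count p =>
          (PySem.List.slice full (some (p.1 + 1))).foldl
            (fun c right =>
              match PySem.List.pyGet? adjacency p.2 with
              | none => c
              | some row => if !(row.contains right) then c + 1 else c)
            count)
        acc
      = aRec adjacency t acc := by
  intro t
  induction t with
  | nil => intro j h acc; simp [PySem.List.enumerate, aRec]
  | cons x t ih =>
    intro j h acc
    have hdrop : full.drop (j + 1) = t := by
      have h2 : (full.drop j).tail = full.drop (j + 1) := List.tail_drop ..
      rw [h] at h2
      simpa using h2.symm
    rw [PySem.List.enumerate_cons, List.foldl_cons]
    have hcast : (j : Int) + 1 = ((j + 1 : Nat) : Int) := by push_cast; ring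
    rw [hcast, PySem.List.slice_from_natCast, hdrop]
    exact ih (j + 1) hdrop _

lemma aRec_split (adjacency : List (List Int)) :
    ∀ (s : List Int), (∀ x ∈ s, (PySem.List.pyGet? adjacency x).isSome = true) →
      ∀ acc : Int, aRec adjacency s acc = acc + sufLen s - sufAdj adjacency s := by
  intro s
  induction s with
  | nil => intro _ acc; simp [aRec, sufLen, sufAdj]
  | cons x t ih =>
    intro hrows acc
    obtain ⟨row, hx⟩ := Option.isSome_iff_exists.mp (hrows x (by simp))
    have hfold : t.foldl
        (fun c right =>
          match PySem.List.pyGet? adjacency x with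
          | none => c
          | some row => if !(row.contains right) then c + 1 else c)
        acc = acc + (List.countP (fun y => !(row.contains y)) t : Int) := by
      simp only [hx]
      exact PySem.List.foldl_count_if (fun y => !(row.contains y)) t acc
    have hsplit : (List.countP (fun y => !(row.contains y)) t : Int)
        = (t.length : Int) - (List.countP (fun y => row.contains y) t : Int) := by
      have h1 := List.length_eq_countP_add_countP (fun y => row.contains y) (l := t)
      have h2 : List.countP (fun a => decide ¬(row.contains a = true)) t
          = List.countP (fun y => !(row.contains y)) t := by
        apply List.countP_congr; intro a _; simp
      rw [h2] at h1
      omega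
    rw [aRec, hfold, ih (fun y hy => hrows y (by simp [hy])), sufLen, sufAdj, hx, hsplit]
    ring

lemma sufLen_tri : ∀ s : List Int, 2 * sufLen s = (s.length : Int) * ((s.length : Int) - 1) := by
  intro s
  induction s with
  | nil => simp [sufLen]
  | cons x t ih =>
    rw [sufLen]
    simp only [List.length_cons]
    push_cast
    linear_combination ih

lemma countP_mem_comm (l1 l2 : List Int) (h1 : l1.Nodup) (h2 : l2.Nodup) :
    List.countP (fun a => l2.contains a) l1 = List.countP (fun a => l1.contains a) l2 := by
  rw [List.countP_eq_length_filter, List.countP_eq_length_filter]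
  have key : ∀ (u v : List Int), u.Nodup → v.Nodup →
      (List.filter (fun a => v.contains a) u).length = (u.toFinset ∩ v.toFinset).card := by
    intro u v hu hv
    have hnd : (List.filter (fun a => v.contains a) u).Nodup := hu.filter _
    rw [← List.toFinset_card_of_nodup hnd, List.toFinset_filter]
    congr 1
    ext a
    simp [List.mem_toFinset]
  rw [key l1 l2 h1 h2, key l2 l1 h2 h1, Finset.inter_comm]

lemma sufAdj_eq (adjacency : List (List Int)) (ns : List Int) :
    ∀ s : List Int, s.Pairwise (· < ·) →
      (∀ x ∈ s, x ∈ ns) →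
      (∀ x ∈ s, ∀ r ∈ ns, x < r → r ∈ s) →
      (∀ x ∈ s, ∀ row, PySem.List.pyGet? adjacency x = some row → row.Nodup) →
      sufAdj adjacency s = (s.map (bCnt adjacency ns)).sum := by
  intro s
  induction s with
  | nil => intro _ _ _ _; simp [sufAdj]
  | cons x t ih =>
    intro hpw hsub hsup hrows
    have hxt : ∀ r, r ∈ t ↔ (x < r ∧ r ∈ ns) := by
      intro r
      constructor
      · intro hr
        exact ⟨List.rel_of_pairwise_cons hpw hr, hsub r (by simp [hr])⟩
      · rintro ⟨hlt, hrns⟩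
        have hm := hsup x (by simp) r hrns hlt
        rcases List.mem_cons.mp hm with h | h
        · rw [h] at hlt; exact absurd hlt (lt_irrefl x)
        · exact h
    have htnd : t.Nodup := ((List.pairwise_cons.mp hpw).2.imp ne_of_lt)
    have hhead : (match PySem.List.pyGet? adjacency x with
        | none => (0 : Int)
        | some row => (List.countP (fun y => row.contains y) t : Int)) = bCnt adjacency ns x := by
      unfold bCnt
      cases hx : PySem.List.pyGet? adjacency x with
      | none => rfl
      | some row =>
        have hrownd : row.Nodup := hrows x (by simp) row hx
        show (List.countP (fun y => row.contains y) t : Int)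
            = (List.countP (fun r => decide (x < r) && ns.contains r) row : Int)
        rw [countP_mem_comm t row htnd hrownd]
        congr 1
        apply List.countP_congr
        intro r _
        have hiff : (t.contains r = true) ↔ ((decide (x < r) && ns.contains r) = true) := by
          simp only [List.contains_iff_mem, Bool.and_eq_true, decide_eq_true_eq]
          exact hxt r
        exact hiff
    have htail : sufAdj adjacency t = (t.map (bCnt adjacency ns)).sum := by
      apply ih (List.pairwise_cons.mp hpw).2
      · intro y hy; exact hsub y (by simp [hy])
      · intro y hy r hrns hlt
        have hy' : x < y := List.rel_of_pairwise_cons hpw hy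
        have : r ∈ x :: t := hsup y (by simp [hy]) r hrns hlt
        rcases List.mem_cons.mp this with h | h
        · have hxr : x < r := lt_trans hy' hlt
          rw [h] at hxr
          exact absurd hxr (lt_irrefl x)
        · exact h
      · intro y hy row hrow; exact hrows y (by simp [hy]) row hrow
    rw [sufAdj, hhead, htail, List.map_cons, List.sum_cons]

lemma alt_fold (adjacency : List (List Int)) (ns : List Int) :
    ∀ (l : List Int) (acc : Int),
      l.foldl
        (fun acc left =>
          match PySem.List.pyGet? adjacency left with
          | none => acc
          | some row =>
            acc + row.foldl (fun c r => if decide (left < r) && ns.contains r then c + 1 else c) 0)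
        acc
      = acc + (l.map (bCnt adjacency ns)).sum := by
  intro l
  induction l with
  | nil => intro acc; simp
  | cons x t ih =>
    intro acc
    rw [List.foldl_cons, ih, List.map_cons, List.sum_cons]
    cases hx : PySem.List.pyGet? adjacency x with
    | none => simp [bCnt, hx]
    | some row =>
      show acc + List.foldl (fun c r => if decide (x < r) && ns.contains r then c + 1 else c) 0 row
            + (List.map (bCnt adjacency ns) t).sum
          = acc + (bCnt adjacency ns x + (List.map (bCnt adjacency ns) t).sum)
      rw [PySem.List.foldl_count_if (fun r => decide (x < r) && ns.contains r) row 0]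
      simp [bCnt, hx]
      ring

-- ===== VERDICT (by name: the statement is the Claim_ definition above) =====
theorem fill_count_spec : Claim_equal_fill_count := by
  intro adjacency node _ hpre
  obtain ⟨hnode, hns, hnd⟩ := hpre
  obtain ⟨ns, h⟩ := Option.isSome_iff_exists.mp hnode
  rw [h] at hns
  simp only [Option.getD_some] at hns
  unfold Spec_fill_count fill_count fill_count_alt
  simp only [h]
  set s := PySem.List.sorted ns (fun x => x) with hs
  -- facts about s
  have hperm : s.Perm ns := PySem.List.sorted_perm ns (fun x => x) false
  have hmem : ∀ x, x ∈ s ↔ x ∈ ns := fun x => hperm.mem_iff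
  have hnsnd : ns.Nodup := hnd ns (by apply PySem.List.mem_of_pyGet?_eq_some; exact h)
  have hsnd : s.Nodup := (hperm.nodup_iff).mpr hnsnd
  have hle : s.Pairwise (fun a b => a ≤ b) := PySem.List.sorted_pairwise ns (fun x => x)
  have hlt : s.Pairwise (· < ·) := (hle.and hsnd).imp (fun hab => lt_of_le_of_ne hab.1 hab.2)
  have hrows : ∀ x ∈ s, (PySem.List.pyGet? adjacency x).isSome = true := by
    intro x hx; exact hns x ((hmem x).mp hx)
  -- A side
  have ha : (PySem.List.enumerate s (0 : Int)).foldl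
      (fun count p =>
        (PySem.List.slice s (some (p.1 + 1))).foldl
          (fun c right =>
            match PySem.List.pyGet? adjacency p.2 with
            | none => c
            | some row => if !(row.contains right) then c + 1 else c)
          count)
      0 = aRec adjacency s 0 := by
    have h0 : ((0 : Nat) : Int) = (0 : Int) := by norm_num
    rw [← h0]
    exact foldA adjacency s s 0 (by simp) 0
  have hsplit := aRec_split adjacency s hrows 0
  have hadj : sufAdj adjacency s = (s.map (bCnt adjacency ns)).sum := by
    apply sufAdj_eq adjacency ns s hlt
    · intro x hx; exact (hmem x).mp hx
    · intro x _ r hr _; exact (hmem r).mpr hr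
    · intro x hx row hrow
      exact hnd row (by apply PySem.List.mem_of_pyGet?_eq_some; exact hrow)
  -- B side
  have hb := alt_fold adjacency ns ns 0
  have hps : (s.map (bCnt adjacency ns)).sum = (ns.map (bCnt adjacency ns)).sum :=
    (hperm.map (bCnt adjacency ns)).sum_eq
  -- the triangular count
  have hlen : s.length = ns.length := hperm.length_eq
  have htri : PySem.Int.floordiv ((ns.length : Int) * ((ns.length : Int) - 1)) 2 = sufLen s := by
    have h2 : (ns.length : Int) * ((ns.length : Int) - 1) = 2 * sufLen s := by
      rw [sufLen_tri s, hlen]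
    rw [h2, PySem.Int.floordiv_eq_ediv_of_pos (by norm_num)]
    exact Int.mul_ediv_cancel_left _ (by norm_num)
  simp only [ha, hsplit, hb, hadj, hps, ← htri]
  ring
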